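-- pv_equiv track=rewrite | github.com/mdajijulhakimquanta/BdAIO | Mock_test/D_Passwords.py | count_passwords
-- ===== SOURCE A (Python) =====
-- def count_passwords(s):
--     count = 0
--     n = len(s)
--     i = 0
--     while i < n:
--         on_lower = False
--         on_upper = False
--         on_digit = False
--         j = i
--         while j < n:
--             c = s[j]
--             if c.islower():
--                 on_lower = True
--             elif c.isupper():
--                 on_upper = True
--             elif c.isdigit():
--                 on_digit = True
--             if on_lower and on_upper and on_digit:
--                 count += 1
--                 i = j  # the next start will be j+1
--                 break
--             j += 1
--         i += 1
--     return count
-- ===== SOURCE B (Python) =====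
-- def count_passwords(s):
--     count = 0
--     lo = up = di = False
--     for c in s:
--         if c.islower():
--             lo = True
--         elif c.isupper():
--             up = True
--         elif c.isdigit():
--             di = True
--         if lo and up and di:
--             count += 1
--             lo = up = di = False
--     return count
-- ===== Notes on version B (the rewrite author's own statement) =====
-- stated objective: faster
-- what changed: Replaced A's nested while-loops (which, whenever a scan from i reaches the end incomplete, restart a fresh scan from i+1, i+2, ...) by a single left-to-right pass carrying three flags that are reset each time all three categories are seen.
import Mathlib
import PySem

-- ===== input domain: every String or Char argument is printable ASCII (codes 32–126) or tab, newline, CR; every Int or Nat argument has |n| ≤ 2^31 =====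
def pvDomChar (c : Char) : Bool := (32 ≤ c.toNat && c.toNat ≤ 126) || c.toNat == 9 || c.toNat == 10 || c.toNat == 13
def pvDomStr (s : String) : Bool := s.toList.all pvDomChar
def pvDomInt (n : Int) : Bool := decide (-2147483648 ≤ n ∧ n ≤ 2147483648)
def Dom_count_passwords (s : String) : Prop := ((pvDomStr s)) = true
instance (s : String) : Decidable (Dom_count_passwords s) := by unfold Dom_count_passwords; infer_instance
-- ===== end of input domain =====

-- B replaces A's restart-from-i rescans by one pass with three flags reset on each completion.

-- ===== PORT A =====
-- inner while loop of A: 'while j < n' walking j over s[j:], carrying the three flags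
-- (the if/elif chain is rendered as `lo || c.isLower` etc.); returns the index of the
-- 'break' (all three flags true), or none if the scan reaches the end of the string.
def pvAInner (rest : List Char) (j : Nat) (lo up di : Bool) : Option Nat :=
  match rest with
  | [] => none
  | c :: rest =>
    if (lo || c.isLower) && (up || (!c.isLower && c.isUpper)) &&
        (di || (!c.isLower && !c.isUpper && c.isDigit)) then some j
    else pvAInner rest (j+1) (lo || c.isLower) (up || (!c.isLower && c.isUpper))
        (di || (!c.isLower && !c.isUpper && c.isDigit))

-- outer while loop of A: on a break at j the next start is j+1, else i+1
-- (i strictly increases each iteration, so fuel = len(s) + 1 - i never runs out)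
def pvAOuter (cs : List Char) (fuel : Nat) (i : Nat) (count : Int) : Int :=
  match fuel with
  | 0 => count
  | fuel+1 =>
    if i < cs.length then
      match pvAInner (cs.drop i) i false false false with
      | some j => pvAOuter cs fuel (j+1) (count+1)
      | none => pvAOuter cs fuel (i+1) count
    else count

def count_passwords (s : String) : Int := pvAOuter s.toList (s.toList.length + 1) 0 0

-- ===== PORT B =====
-- single pass over the characters with three flags, reset on each completion
def pvBLoop (cs : List Char) (lo up di : Bool) (count : Int) : Int :=
  match cs with
  | [] => count
  | c :: rest =>
    if (lo || c.isLower) && (up || (!c.isLower && c.isUpper)) &&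
        (di || (!c.isLower && !c.isUpper && c.isDigit)) then
      pvBLoop rest false false false (count+1)
    else
      pvBLoop rest (lo || c.isLower) (up || (!c.isLower && c.isUpper))
        (di || (!c.isLower && !c.isUpper && c.isDigit)) count

def count_passwords_alt (s : String) : Int := pvBLoop s.toList false false false 0

-- ===== PRECONDITION & SPEC =====
def Spec_count_passwords (s : String) (out : Int) : Prop := out = count_passwords_alt s
instance (s : String) (out : Int) : Decidable (Spec_count_passwords s out) := by unfold Spec_count_passwords; infer_instance

-- ===== CLAIM (what is proved, stated in full; the proofs are below) =====
def Claim_equal_count_passwords : Prop := ∀ (s : String), Dom_count_passwords s → Spec_count_passwords s (count_passwords s)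

-- ===== LEMMAS AND PROOFS =====

-- the break index lies between the start index and the end of the scanned suffix
theorem pvAInner_some_bounds (rest : List Char) :
    ∀ (j : Nat) (lo up di : Bool) (k : Nat),
      pvAInner rest j lo up di = some k → j ≤ k ∧ k < j + rest.length := by
  induction rest with
  | nil => intro j lo up di k h; simp [pvAInner] at h
  | cons c rest ih =>
      intro j lo up di k h
      rw [pvAInner] at h
      split at h
      · injection h with h; subst h; simp
      · have := ih (j+1) _ _ _ k h
        simp only [List.length_cons]
        omega

-- B's pass mirrors A's inner scan: one substring counted, then continue past the break
theorem pvBLoop_eq_inner (rest : List Char) :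
    ∀ (j : Nat) (lo up di : Bool) (count : Int),
      pvBLoop rest lo up di count =
        match pvAInner rest j lo up di with
        | some k => pvBLoop (rest.drop (k+1-j)) false false false (count+1)
        | none => count := by
  induction rest with
  | nil => intro j lo up di count; rfl
  | cons c rest ih =>
      intro j lo up di count
      rw [pvAInner, pvBLoop]
      split
      · simp
      · rw [ih (j+1)]
        cases h : pvAInner rest (j+1) _ _ _ with
        | none => rfl
        | some k =>
            have hb := pvAInner_some_bounds rest (j+1) _ _ _ k h
            have hdrop : (c :: rest).drop (k+1-j) = rest.drop (k+1-(j+1)) := by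
              have h1 : k+1-j = (k+1-(j+1)) + 1 := by omega
              rw [h1, List.drop_succ_cons]
            exact (congrArg (fun l => pvBLoop l false false false (count+1)) hdrop).symm

-- monotonicity: if the inner scan fails with larger flags, it fails with smaller ones
theorem pvAInner_none_mono (rest : List Char) :
    ∀ (j : Nat) (lo up di lo' up' di' : Bool),
      (lo = true → lo' = true) → (up = true → up' = true) → (di = true → di' = true) →
      pvAInner rest j lo' up' di' = none → pvAInner rest j lo up di = none := by
  induction rest with
  | nil => intro _ _ _ _ _ _ _ _ _ _ _; rfl
  | cons c rest ih =>
      intro j lo up di lo' up' di' hl hu hd h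
      rw [pvAInner] at h ⊢
      split at h
      · simp at h
      · rename_i hc'
        rw [if_neg ?_]
        · refine ih (j+1) _ _ _ _ _ _ ?_ ?_ ?_ h
          · intro hx
            simp only [Bool.or_eq_true] at hx ⊢
            exact hx.elim (fun t => Or.inl (hl t)) Or.inr
          · intro hx
            simp only [Bool.or_eq_true] at hx ⊢
            exact hx.elim (fun t => Or.inl (hu t)) Or.inr
          · intro hx
            simp only [Bool.or_eq_true] at hx ⊢
            exact hx.elim (fun t => Or.inl (hd t)) Or.inr
        · intro hc
          apply hc'
          simp only [Bool.and_eq_true, Bool.or_eq_true] at hc ⊢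
          obtain ⟨⟨h1, h2⟩, h3⟩ := hc
          exact ⟨⟨h1.elim (fun t => Or.inl (hl t)) Or.inr,
                 h2.elim (fun t => Or.inl (hu t)) Or.inr⟩,
                 h3.elim (fun t => Or.inl (hd t)) Or.inr⟩

-- a failed scan from i still fails from i+1 (its characters are a suffix, its flags start smaller)
theorem pvAInner_none_succ (cs : List Char) (i : Nat) (hi : i < cs.length)
    (h : pvAInner (cs.drop i) i false false false = none) :
    pvAInner (cs.drop (i+1)) (i+1) false false false = none := by
  rw [List.drop_eq_getElem_cons hi, pvAInner] at h
  split at h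
  · simp at h
  · exact pvAInner_none_mono _ (i+1) _ _ _ _ _ _ (by simp) (by simp) (by simp) h

-- if the inner scan from i fails, A's outer loop adds nothing from i on
theorem pvAOuter_of_none (cs : List Char) (fuel : Nat) :
    ∀ (i : Nat) (count : Int), pvAInner (cs.drop i) i false false false = none →
      pvAOuter cs fuel i count = count := by
  induction fuel with
  | zero => intro i count _; rfl
  | succ fuel ih =>
      intro i count h
      rw [pvAOuter]
      split
      · rename_i hi
        rw [h]
        exact ih (i+1) count (pvAInner_none_succ cs i hi h)
      · rfl

-- A's outer loop computes exactly B's single pass on the remaining suffix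
theorem pvAOuter_eq_bLoop (cs : List Char) (fuel : Nat) :
    ∀ (i : Nat) (count : Int), cs.length ≤ fuel + i →
      pvAOuter cs fuel i count = pvBLoop (cs.drop i) false false false count := by
  induction fuel with
  | zero =>
      intro i count hf
      have : cs.drop i = [] := List.drop_eq_nil_of_le (by omega)
      simp [this, pvAOuter, pvBLoop]
  | succ fuel ih =>
      intro i count hf
      rw [pvAOuter]
      split
      · rename_i hi
        cases h : pvAInner (cs.drop i) i false false false with
        | some j =>
            show pvAOuter cs fuel (j+1) (count+1) = pvBLoop (cs.drop i) false false false count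
            have hb := pvAInner_some_bounds (cs.drop i) i _ _ _ j h
            rw [List.length_drop] at hb
            rw [ih (j+1) (count+1) (by omega),
                pvBLoop_eq_inner (cs.drop i) i false false false count, h]
            have : (cs.drop i).drop (j+1-i) = cs.drop (j+1) := by
              rw [List.drop_drop]
              congr 1
              omega
            exact congrArg (fun l => pvBLoop l false false false (count+1)) this.symm
        | none =>
            show pvAOuter cs fuel (i+1) count = pvBLoop (cs.drop i) false false false count
            rw [pvAOuter_of_none cs fuel (i+1) count (pvAInner_none_succ cs i ‹_› h),
                pvBLoop_eq_inner (cs.drop i) i false false false count, h]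
      · rename_i hi
        have : cs.drop i = [] := List.drop_eq_nil_of_le (by omega)
        simp [this, pvBLoop]

-- ===== VERDICT (by name: the statement is the Claim_ definition above) =====
theorem count_passwords_spec : Claim_equal_count_passwords := by
  intro s _
  unfold Spec_count_passwords count_passwords count_passwords_alt
  simpa using pvAOuter_eq_bLoop s.toList (s.toList.length + 1) 0 0 (by omega)
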